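-- pv_equiv track=rewrite | github.com/Aayushi31005/career-intelligence-platform | backend/services/role_matching_service.py | normalize_resume_skills
-- ===== SOURCE A (Python) =====
-- def normalize_resume_skills(resume_text: str, taxonomy: dict):
--     text = resume_text.lower()
--     found_skills = set()
--
--     for skill, meta in taxonomy.items():
--         if skill in text:
--             found_skills.add(skill)
--             continue
--         for alias in meta.get("aliases", []):
--             if alias in text:
--                 found_skills.add(skill)
--                 break
--
--     return found_skills
-- ===== SOURCE B (Python) =====
-- def normalize_resume_skills(resume_text: str, taxonomy: dict):
--     text = resume_text.lower()
--     # collect every distinct pattern (skills and aliases) once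
--     patterns = set()
--     for skill, meta in taxonomy.items():
--         patterns.add(skill)
--         patterns.update(meta.get("aliases", []))
--     # test each distinct pattern against the text exactly once
--     present = {p for p in patterns if p in text}
--     # decide each skill by set membership / intersection, no substring checks here
--     return {skill for skill, meta in taxonomy.items()
--             if skill in present or not present.isdisjoint(meta.get("aliases", []))}
-- ===== Notes on version B (the rewrite author's own statement) =====
-- stated objective: alternative
-- what changed: B deduplicates all skills and aliases into one pattern set, tests each distinct pattern against the text once to build a 'present' set, and then selects skills by pure set membership/intersection, instead of A's nested per-skill loop with substring checks and break.
import Mathlib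
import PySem

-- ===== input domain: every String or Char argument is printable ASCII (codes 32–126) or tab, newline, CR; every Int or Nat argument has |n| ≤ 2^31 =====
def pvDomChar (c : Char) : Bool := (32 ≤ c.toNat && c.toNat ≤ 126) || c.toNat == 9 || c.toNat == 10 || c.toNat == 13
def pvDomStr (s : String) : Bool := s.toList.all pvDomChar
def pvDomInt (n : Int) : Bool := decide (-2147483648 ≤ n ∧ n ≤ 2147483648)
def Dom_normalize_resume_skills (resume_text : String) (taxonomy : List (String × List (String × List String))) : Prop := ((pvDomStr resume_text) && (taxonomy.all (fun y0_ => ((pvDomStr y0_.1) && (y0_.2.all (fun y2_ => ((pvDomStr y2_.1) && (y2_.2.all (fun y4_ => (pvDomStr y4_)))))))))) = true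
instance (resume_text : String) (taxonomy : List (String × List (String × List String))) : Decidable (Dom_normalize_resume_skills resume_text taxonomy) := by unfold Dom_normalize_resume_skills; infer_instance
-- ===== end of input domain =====

-- B replaces A's nested per-skill substring loop by a deduplicated pattern set tested once
-- against the text plus set-membership decisions (objective: alternative; same cost class).


-- ===== PORT A =====
-- inner 'for alias in meta.get("aliases", []): if alias in text: add; break'
def pvAliasScanA (text : String) (skill : String) (found : PySem.Set String) : List String → PySem.Set String
  | [] => found
  | a :: rest =>
      if PySem.Str.isIn a text then PySem.Set.add found skill
      else pvAliasScanA text skill found rest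

def normalize_resume_skills (resume_text : String) (taxonomy : List (String × List (String × List String))) : List String :=
  let text := PySem.Str.lower resume_text
  (PySem.Dict.ofList taxonomy).items.foldl
    (fun found p =>
      if PySem.Str.isIn p.1 text then PySem.Set.add found p.1
      else pvAliasScanA text p.1 found ((PySem.Dict.ofList p.2).getD "aliases" []))
    PySem.Set.empty

-- ===== PORT B =====
def normalize_resume_skills_alt (resume_text : String) (taxonomy : List (String × List (String × List String))) : List String :=
  let text := PySem.Str.lower resume_text
  let items := (PySem.Dict.ofList taxonomy).items
  let patterns := items.foldl
    (fun s p => PySem.Set.update (PySem.Set.add s p.1) ((PySem.Dict.ofList p.2).getD "aliases" []))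
    PySem.Set.empty
  let present : PySem.Set String := patterns.filter (fun q => PySem.Str.isIn q text)
  items.foldl
    (fun out p =>
      if PySem.Set.contains present p.1
         || !(PySem.Set.isdisjoint present ((PySem.Dict.ofList p.2).getD "aliases" [])) then
        PySem.Set.add out p.1
      else out)
    PySem.Set.empty

-- ===== PRECONDITION & SPEC =====
def Spec_normalize_resume_skills (resume_text : String) (taxonomy : List (String × List (String × List String))) (out : List String) : Prop := out = normalize_resume_skills_alt resume_text taxonomy
instance (resume_text : String) (taxonomy : List (String × List (String × List String))) (out : List String) : Decidable (Spec_normalize_resume_skills resume_text taxonomy out) := by unfold Spec_normalize_resume_skills; infer_instance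

-- ===== CLAIM (what is proved, stated in full; the proofs are below) =====
def Claim_equal_normalize_resume_skills : Prop := ∀ (resume_text : String) (taxonomy : List (String × List (String × List String))), Dom_normalize_resume_skills resume_text taxonomy → Spec_normalize_resume_skills resume_text taxonomy (normalize_resume_skills resume_text taxonomy)

-- ===== LEMMAS AND PROOFS =====

-- A's inner loop adds `skill` iff some alias occurs in the text
theorem pvAliasScanA_eq (text skill : String) (found : PySem.Set String) (as : List String) :
    pvAliasScanA text skill found as =
      if as.any (fun a => PySem.Str.isIn a text) then PySem.Set.add found skill else found := by
  induction as with
  | nil => simp [pvAliasScanA]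
  | cons a rest ih =>
      simp only [pvAliasScanA, List.any_cons]
      by_cases h : PySem.Str.isIn a text = true
      · rw [if_pos h]; simp only [h]; simp
      · have h' : PySem.Str.isIn a text = false := by simpa using h
        rw [if_neg h, ih]; simp only [h']; simp

-- membership in B's accumulated pattern set (the direction we need)
theorem pvMemPatterns (l : List (String × List (String × List String)))
    (s : PySem.Set String) (x : String)
    (h : x ∈ s ∨ ∃ p ∈ l, x = p.1 ∨ x ∈ (PySem.Dict.ofList p.2).getD "aliases" []) :
    x ∈ l.foldl
      (fun s p => PySem.Set.update (PySem.Set.add s p.1) ((PySem.Dict.ofList p.2).getD "aliases" []))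
      s := by
  induction l generalizing s with
  | nil => simpa using h.resolve_right (by simp)
  | cons p rest ih =>
      simp only [List.foldl_cons]
      apply ih
      rcases h with hs | ⟨q, hq, hx⟩
      · exact Or.inl (by simp [PySem.Set.mem_update, PySem.Set.mem_add, hs])
      · rcases List.mem_cons.mp hq with rfl | hq'
        · exact Or.inl (by
            rcases hx with rfl | hx
            · simp [PySem.Set.mem_update, PySem.Set.mem_add]
            · simp [PySem.Set.mem_update, hx])
        · exact Or.inr ⟨q, hq', hx⟩

theorem normalize_resume_skills_eq_alt (resume_text : String)
    (taxonomy : List (String × List (String × List String))) :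
    normalize_resume_skills resume_text taxonomy = normalize_resume_skills_alt resume_text taxonomy := by
  unfold normalize_resume_skills normalize_resume_skills_alt
  apply PySem.List.foldl_congr_mem'
  intro p hp acc
  set text := PySem.Str.lower resume_text with htext
  set items := (PySem.Dict.ofList taxonomy).items with hitems
  set al := (PySem.Dict.ofList p.2).getD "aliases" [] with hal
  set patterns := items.foldl
    (fun s q => PySem.Set.update (PySem.Set.add s q.1) ((PySem.Dict.ofList q.2).getD "aliases" []))
    PySem.Set.empty with hpat
  set present : PySem.Set String := patterns.filter (fun q => PySem.Str.isIn q text) with hpre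
  have hmemp : ∀ x : String, x ∈ present ↔ x ∈ patterns ∧ PySem.Str.isIn x text = true := by
    intro x; rw [hpre]; exact List.mem_filter
  -- B's first disjunct equals A's `skill in text`
  have h1 : PySem.Set.contains present p.1 = PySem.Str.isIn p.1 text := by
    by_cases h : PySem.Str.isIn p.1 text = true
    · rw [h]
      have : p.1 ∈ present := (hmemp p.1).mpr ⟨pvMemPatterns items PySem.Set.empty p.1
        (Or.inr ⟨p, hp, Or.inl rfl⟩), h⟩
      simpa [PySem.Set.contains_iff] using this
    · simp only [Bool.not_eq_true] at h
      rw [h]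
      have : p.1 ∉ present := fun hm => by
        have := ((hmemp p.1).mp hm).2; rw [h] at this; exact Bool.false_ne_true this
      simpa [PySem.Set.contains_iff] using this
  -- B's second disjunct equals A's alias loop condition
  have h2 : (!(PySem.Set.isdisjoint present al)) = al.any (fun a => PySem.Str.isIn a text) := by
    by_cases h : al.any (fun a => PySem.Str.isIn a text) = true
    · rw [h]
      rcases List.any_eq_true.mp h with ⟨a, ha, hin⟩
      have hap : a ∈ present := (hmemp a).mpr ⟨pvMemPatterns items PySem.Set.empty a
        (Or.inr ⟨p, hp, Or.inr ha⟩), hin⟩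
      have hdf : PySem.Set.isdisjoint present al = false := by
        cases hdc : PySem.Set.isdisjoint present al
        · rfl
        · exact absurd ha (((PySem.Set.isdisjoint_iff present al).mp hdc) a hap)
      rw [hdf]; rfl
    · simp only [Bool.not_eq_true] at h
      rw [h]
      have : PySem.Set.isdisjoint present al = true := by
        rw [PySem.Set.isdisjoint_iff]
        intro x hx hxa
        have hin := ((hmemp x).mp hx).2
        have : al.any (fun a => PySem.Str.isIn a text) = true :=
          List.any_eq_true.mpr ⟨x, hxa, hin⟩
        rw [h] at this; exact Bool.false_ne_true this
      rw [this]; rfl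
  rw [pvAliasScanA_eq, h1, h2]
  cases c1 : PySem.Str.isIn p.1 text <;>
    cases c2 : al.any (fun a => PySem.Str.isIn a text) <;>
      simp

-- ===== VERDICT (by name: the statement is the Claim_ definition above) =====
theorem normalize_resume_skills_spec : Claim_equal_normalize_resume_skills := by
  intro resume_text taxonomy _
  unfold Spec_normalize_resume_skills
  exact normalize_resume_skills_eq_alt resume_text taxonomy
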